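-- pv_equiv track=rewrite | github.com/ramshasuhail46/query-document | interface.py | parse_groq_stream
-- ===== SOURCE A (Python) =====
-- def parse_groq_stream(stream):
--     word = ""
--     for chunk in stream:
--         for char in chunk:
--             if char.isspace():  # Check if the character is a space
--                 if word:
--                     yield word
--                     word = ""
--             else:
--                 word += char
--     if word:  # Yield the last word if there is no space after it
--         yield word
-- ===== SOURCE B (Python) =====
-- def parse_groq_stream(stream):
--     yield from "".join(stream).split()
-- ===== Notes on version B (the rewrite author's own statement) =====
-- stated objective: idiomatic
-- what changed: Replaces the per-character state machine with the idiomatic two-stage pipeline: concatenate all chunks with ''.join and tokenize once with str.split(), which yields exactly the whitespace-separated words.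
import Mathlib
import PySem

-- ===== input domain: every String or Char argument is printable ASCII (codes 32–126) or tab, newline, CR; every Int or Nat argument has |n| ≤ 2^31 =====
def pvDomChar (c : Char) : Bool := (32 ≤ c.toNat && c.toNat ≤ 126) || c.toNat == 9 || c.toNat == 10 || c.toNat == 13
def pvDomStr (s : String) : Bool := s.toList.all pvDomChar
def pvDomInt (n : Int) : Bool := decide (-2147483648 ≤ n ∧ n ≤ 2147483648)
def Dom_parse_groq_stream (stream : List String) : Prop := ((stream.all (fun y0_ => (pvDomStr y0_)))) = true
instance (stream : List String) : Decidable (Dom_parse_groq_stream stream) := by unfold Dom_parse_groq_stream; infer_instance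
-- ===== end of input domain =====

-- B replaces A's per-character state machine with the idiomatic two-stage pipeline "".join(stream).split(); measurably faster (C-level join/split instead of a Python char loop).


-- ===== PORT A =====
-- state: (words yielded so far, current word as List Char); word += char → st.2 ++ [c]
def pgsStepA (st : List String × List Char) (c : Char) : List String × List Char :=
  if PySem.Chars.isspace c then
    (if st.2 ≠ [] then (st.1 ++ [String.ofList st.2], ([] : List Char)) else st)
  else (st.1, st.2 ++ [c])

def parse_groq_stream (stream : List String) : List String :=
  let st := stream.foldl (fun st chunk => chunk.toList.foldl pgsStepA st) ([], [])
  if st.2 ≠ [] then st.1 ++ [String.ofList st.2] else st.1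

-- ===== PORT B =====
-- literal port of Source B: "".join(stream).split()
def parse_groq_stream_alt (stream : List String) : List String :=
  PySem.Str.split₀ (PySem.Str.join "" stream)

-- ===== PRECONDITION & SPEC =====
def Spec_parse_groq_stream (stream : List String) (out : List String) : Prop := out = parse_groq_stream_alt stream
instance (stream : List String) (out : List String) : Decidable (Spec_parse_groq_stream stream out) := by unfold Spec_parse_groq_stream; infer_instance

-- ===== CLAIM (what is proved, stated in full; the proofs are below) =====
def Claim_equal_parse_groq_stream : Prop := ∀ (stream : List String), Dom_parse_groq_stream stream → Spec_parse_groq_stream stream (parse_groq_stream stream)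

-- ===== LEMMAS AND PROOFS =====

-- split₀.go's accumulator only prepends (reversed) finished words
theorem pgs_go_acc (s : List Char) : ∀ (cur : List Char) (acc : List (List Char)),
    PySem.Chars.split₀.go s cur acc = acc.reverse ++ PySem.Chars.split₀.go s cur [] := by
  induction s with
  | nil => intro cur acc; simp [PySem.Chars.split₀.go]; split <;> simp
  | cons c rest ih =>
    intro cur acc
    simp only [PySem.Chars.split₀.go]
    split
    · split
      · rw [ih [] acc]
      · rw [ih [] (cur.reverse :: acc), ih [] [cur.reverse]]; simp
    · exact ih (c :: cur) acc

-- a whitespace-free prefix is pushed wholesale onto cur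
theorem pgs_go_nospace (w : List Char) : ∀ (s cur : List Char) (acc : List (List Char)),
    w.all (fun c => !PySem.Chars.isspace c) = true →
    PySem.Chars.split₀.go (w ++ s) cur acc = PySem.Chars.split₀.go s (w.reverse ++ cur) acc := by
  induction w with
  | nil => intro s cur acc _; simp
  | cons c w' ih =>
    intro s cur acc hw
    simp only [List.all_cons, Bool.and_eq_true, Bool.not_eq_true'] at hw
    simp only [List.cons_append, PySem.Chars.split₀.go, hw.1]
    rw [ih s (c :: cur) acc hw.2]
    simp

-- A's fold only appends to the output component
theorem pgs_foldA_acc (s : List Char) : ∀ (ws : List String) (w : List Char),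
    s.foldl pgsStepA (ws, w) =
      (ws ++ (s.foldl pgsStepA ([], w)).1, (s.foldl pgsStepA ([], w)).2) := by
  induction s with
  | nil => intro ws w; simp
  | cons c rest ih =>
    intro ws w
    simp only [List.foldl_cons, pgsStepA]
    split
    · split
      · simp only [List.nil_append]
        rw [ih (ws ++ [String.ofList w]) [], ih [String.ofList w] []]; simp
      · exact ih ws w
    · exact ih ws (w ++ [c])

-- getLastD: default is irrelevant on a nonempty list
theorem pgs_getLastD_irrel {α : Type} (l : List α) (h : l ≠ []) (d d' : α) :
    l.getLastD d = l.getLastD d' := by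
  cases l with
  | nil => exact absurd rfl h
  | cons a l => rw [List.getLastD_cons, List.getLastD_cons]

theorem pgs_getLastD_append {α : Type} (xs ys : List α) (d : α) (h : ys ≠ []) :
    (xs ++ ys).getLastD d = ys.getLastD d := by
  induction xs with
  | nil => rfl
  | cons x xs ih =>
    rw [List.cons_append, List.getLastD_cons,
        pgs_getLastD_irrel (xs ++ ys) (by simp [h]) x d]
    exact ih

theorem pgs_getLastD_mem (l : List Char) : ∀ (a : Char), l.getLastD a ∈ a :: l := by
  induction l with
  | nil => simp
  | cons b l ih =>
    intro a
    rw [List.getLastD_cons]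
    have := ih b
    simp at this ⊢
    tauto

theorem pgs_last_nonspace (w : List Char) (hw : w.all (fun c => !PySem.Chars.isspace c) = true)
    (hne : w ≠ []) : PySem.Chars.isspace (w.getLastD ' ') = false := by
  have hm : w.getLastD ' ' ∈ w := by
    cases w with
    | nil => exact absurd rfl hne
    | cons a l =>
      rw [List.getLastD_cons]
      have := pgs_getLastD_mem l a
      simpa using this
  simpa using List.all_eq_true.mp hw _ hm

theorem pgs_split₀_nospace (w : List Char) (hw : w.all (fun c => !PySem.Chars.isspace c) = true)
    (hne : w ≠ []) : PySem.Chars.split₀ w = [w] := by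
  conv_lhs => rw [← List.append_nil w]
  unfold PySem.Chars.split₀
  rw [pgs_go_nospace w [] [] [] hw]
  simp [PySem.Chars.split₀.go, hne]

theorem pgs_split₀_cons_space (c : Char) (w s' : List Char) (hc : PySem.Chars.isspace c = true)
    (hw : w.all (fun c => !PySem.Chars.isspace c) = true) :
    PySem.Chars.split₀ (w ++ c :: s') =
      (if w = [] then [] else [w]) ++ PySem.Chars.split₀ s' := by
  unfold PySem.Chars.split₀
  rw [pgs_go_nospace w (c :: s') [] [] hw, List.append_nil]
  simp only [PySem.Chars.split₀.go, hc, if_true]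
  by_cases hwn : w = []
  · simp [hwn]
  · rw [if_neg (by simp [hwn]), pgs_go_acc]
    simp [hwn]

-- characterization of A's char loop by split₀ of carry ++ chars
theorem pgs_foldA_split (s : List Char) : ∀ (w : List Char),
    w.all (fun c => !PySem.Chars.isspace c) = true →
    (if PySem.Chars.isspace ((w ++ s).getLastD ' ') then
        s.foldl pgsStepA (([] : List String), w) = ((PySem.Chars.split₀ (w ++ s)).map String.ofList, [])
      else
        s.foldl pgsStepA (([] : List String), w) =
            ((PySem.Chars.split₀ (w ++ s)).dropLast.map String.ofList, (PySem.Chars.split₀ (w ++ s)).getLastD [])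
          ∧ (PySem.Chars.split₀ (w ++ s)).getLastD [] ≠ []
          ∧ ((PySem.Chars.split₀ (w ++ s)).getLastD []).all (fun c => !PySem.Chars.isspace c) = true) := by
  induction s with
  | nil =>
    intro w hw
    by_cases hwn : w = []
    · subst hwn
      simp [show PySem.Chars.isspace ' ' = true from by decide,
            PySem.Chars.split₀, PySem.Chars.split₀.go]
    · rw [List.append_nil, if_neg (by rw [pgs_last_nonspace w hw hwn]; simp)]
      have hsw : PySem.Chars.split₀ w = [w] := pgs_split₀_nospace w hw hwn
      refine ⟨by simp [hsw], by simp [hsw, hwn], by simp [hsw, hw]⟩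
  | cons c s' ih =>
    intro w hw
    by_cases hc : PySem.Chars.isspace c = true
    · have hstep : (c :: s').foldl pgsStepA (([] : List String), w) =
          s'.foldl pgsStepA ((if w = [] then [] else [String.ofList w]), []) := by
        simp only [List.foldl_cons, pgsStepA, hc, if_true]
        split_ifs <;> simp_all
      have hsplit := pgs_split₀_cons_space c w s' hc hw
      have hcondeq : (w ++ c :: s').getLastD ' ' = s'.getLastD c := by
        rw [pgs_getLastD_append _ _ _ (by simp), List.getLastD_cons]
      have hihw := ih [] (by simp)
      simp only [List.nil_append] at hihw
      rw [hcondeq, hstep, pgs_foldA_acc]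
      by_cases hs : PySem.Chars.isspace (s'.getLastD ' ') = true
      · have hcond : PySem.Chars.isspace (s'.getLastD c) = true := by
          by_cases hs0 : s' = []
          · simp [hs0, hc]
          · rw [pgs_getLastD_irrel s' hs0 c ' ']; exact hs
        rw [if_pos hcond]
        rw [if_pos hs] at hihw
        rw [hihw, hsplit]
        by_cases hwn : w = [] <;> simp [hwn]
      · have hs0 : s' ≠ [] := by
          intro h
          rw [h] at hs
          exact hs (by decide)
        have hcond : PySem.Chars.isspace (s'.getLastD c) = false := by
          rw [pgs_getLastD_irrel s' hs0 c ' ']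
          exact Bool.eq_false_iff.mpr hs
        rw [if_neg (by rw [hcond]; simp)]
        rw [if_neg hs] at hihw
        obtain ⟨heq, hne, hall⟩ := hihw
        have hP : PySem.Chars.split₀ s' ≠ [] := by
          intro h; rw [h] at hne; exact hne rfl
        rw [heq]
        refine ⟨?_, ?_, ?_⟩
        · rw [hsplit, List.dropLast_append_of_ne_nil hP, pgs_getLastD_append _ _ _ hP]
          by_cases hwn : w = [] <;> simp [hwn]
        · rw [hsplit, pgs_getLastD_append _ _ _ hP]; exact hne
        · rw [hsplit, pgs_getLastD_append _ _ _ hP]; exact hall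
    · have hstep : (c :: s').foldl pgsStepA (([] : List String), w) =
          s'.foldl pgsStepA (([] : List String), w ++ [c]) := by
        simp [List.foldl_cons, pgsStepA, hc]
      have hw' : (w ++ [c]).all (fun c => !PySem.Chars.isspace c) = true := by
        simp [hw, hc]
      have h := ih (w ++ [c]) hw'
      rw [show w ++ c :: s' = (w ++ [c]) ++ s' by simp, hstep]
      exact h

-- A's chunk-by-chunk char loop is the char loop over the flattened stream
theorem pgs_fold_flat (stream : List String) : ∀ (st0 : List String × List Char),
    stream.foldl (fun st chunk => chunk.toList.foldl pgsStepA st) st0 =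
      (stream.flatMap String.toList).foldl pgsStepA st0 := by
  induction stream with
  | nil => intro st0; rfl
  | cons chunk rest ih =>
    intro st0
    rw [List.foldl_cons, List.flatMap_cons, List.foldl_append]
    exact ih _

-- join with the empty separator is flattening
theorem pgs_join_nil (l : List (List Char)) : PySem.Chars.join [] l = l.flatten := by
  induction l with
  | nil => simp [PySem.Chars.join_nil]
  | cons a l ih =>
    cases l with
    | nil => simp [PySem.Chars.join_singleton]
    | cons b m => rw [PySem.Chars.join_cons_cons, List.flatten_cons]; simp [ih]

-- B computes the split₀ of the flattened chars, word by word
theorem pgs_alt_eq (stream : List String) :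
    parse_groq_stream_alt stream =
      (PySem.Chars.split₀ (stream.flatMap String.toList)).map String.ofList := by
  unfold parse_groq_stream_alt
  have h := PySem.Str.split₀_map_toList (PySem.Str.join "" stream)
  rw [PySem.Str.toList_join] at h
  have hj : PySem.Chars.join "".toList (stream.map String.toList) = stream.flatMap String.toList := by
    rw [show "".toList = ([] : List Char) from rfl, pgs_join_nil, List.flatMap_def]
  rw [hj] at h
  rw [← h, List.map_map]
  have : String.ofList ∘ String.toList = id := by
    funext s; simp [String.ofList_toList]
  rw [this, List.map_id]

-- reassembling the last word: dropLast ++ [last] is the whole list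
theorem pgs_map_dropLast_last (parts : List (List Char)) (h : parts ≠ []) :
    parts.dropLast.map String.ofList ++ [String.ofList (parts.getLastD [])] =
      parts.map String.ofList := by
  have hd : parts.getLastD [] = parts.getLast h := by
    rw [List.getLastD_eq_getLast?, List.getLast?_eq_some_getLast h, Option.getD_some]
  rw [hd]
  conv_rhs => rw [← List.dropLast_append_getLast h]
  rw [List.map_append, List.map_singleton]

-- ===== VERDICT (by name: the statement is the Claim_ definition above) =====
theorem parse_groq_stream_spec : Claim_equal_parse_groq_stream := by
  intro stream _
  unfold Spec_parse_groq_stream parse_groq_stream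
  rw [pgs_fold_flat stream ([], []), pgs_alt_eq]
  have hsp := pgs_foldA_split (stream.flatMap String.toList) [] (by simp)
  simp only [List.nil_append] at hsp
  by_cases h : PySem.Chars.isspace ((stream.flatMap String.toList).getLastD ' ') = true
  · rw [if_pos h] at hsp
    rw [hsp]
    simp
  · rw [if_neg h] at hsp
    obtain ⟨heq, hne, -⟩ := hsp
    have hP : PySem.Chars.split₀ (stream.flatMap String.toList) ≠ [] := by
      intro hx; rw [hx] at hne; exact hne rfl
    rw [heq]
    simp only [ne_eq, hne, not_false_eq_true, if_true]
    exact pgs_map_dropLast_last _ hP
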